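-- pv_equiv track=rewrite | github.com/pypi-data/pypi-mirror-392 | packages/pinggy/pinggy-0.0.19-cp310-abi3-win32.whl/pinggy/__main__.py | parse_server_address_and_type
-- ===== SOURCE A (Python) =====
-- def parse_server_address_and_type(server_address):
--     force = False
--     token = None
--     tunnel_type = None
--     udp_type = None
--     address = None
--
--     parts = server_address.split("@")
--     if len(parts) == 2:
--         type_and_token, address = parts
--         type_and_token_parts = type_and_token.split("+")
--         for p in type_and_token_parts:
--             orig = p
--             p = p.lower()
--             if p == "force":
--                 force = True
--             elif p == "udp":
--                 udp_type = p
--             elif p == "http" or p == "tcp" or p == "tls" or p == "tlstcp":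
--                 tunnel_type = p
--             elif p != "qr" and p != "aqr" and p != "auth":
--                 if token is None:
--                     token = orig
--     else:
--         address = parts[0]
--
--     return address, tunnel_type, udp_type, token, force
-- ===== SOURCE B (Python) =====
-- _SPECIAL = {"force", "udp", "http", "tcp", "tls", "tlstcp", "qr", "aqr", "auth"}
-- _TUNNEL = {"http", "tcp", "tls", "tlstcp"}
--
-- def parse_server_address_and_type(server_address):
--     parts = server_address.split("@")
--     if len(parts) != 2:
--         return parts[0], None, None, None, False
--     type_and_token, address = parts
--     ps = type_and_token.split("+")
--     lows = [p.lower() for p in ps]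
--     force = any(l == "force" for l in lows)
--     udp_type = "udp" if "udp" in lows else None
--     tunnel_type = next((l for l in reversed(lows) if l in _TUNNEL), None)
--     token = next((p for p, l in zip(ps, lows) if l not in _SPECIAL), None)
--     return address, tunnel_type, udp_type, token, force
-- ===== Notes on version B (the rewrite author's own statement) =====
-- stated objective: simpler
-- what changed: Replaces the single stateful for-loop (five mutable variables updated through a branch chain) with independent one-liner passes: any() for force, membership for udp, a reversed-search for the last tunnel keyword, and a first-match scan for the token.
import Mathlib
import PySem

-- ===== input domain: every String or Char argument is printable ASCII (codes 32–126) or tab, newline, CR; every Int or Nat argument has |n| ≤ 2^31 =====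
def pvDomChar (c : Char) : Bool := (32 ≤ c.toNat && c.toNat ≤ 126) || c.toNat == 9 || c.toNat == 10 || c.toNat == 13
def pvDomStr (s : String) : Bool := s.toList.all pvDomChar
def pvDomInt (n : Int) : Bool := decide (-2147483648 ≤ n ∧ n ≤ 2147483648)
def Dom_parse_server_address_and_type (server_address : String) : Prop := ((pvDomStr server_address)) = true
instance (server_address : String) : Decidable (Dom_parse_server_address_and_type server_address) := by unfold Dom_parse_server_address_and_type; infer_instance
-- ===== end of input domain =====

-- B replaces A's single stateful for-loop with independent single-purpose passes (simpler decomposition).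

-- ===== PORT A =====
-- A's for-loop over type_and_token.split("+"), threading (force, token, tunnel_type, udp_type)
def pvLoopA : List String → Bool × Option String × Option String × Option String →
    Bool × Option String × Option String × Option String
  | [], st => st
  | orig :: rest, (force, token, tunnel, udp) =>
    let p := PySem.Str.lower orig
    if p = "force" then pvLoopA rest (true, token, tunnel, udp)
    else if p = "udp" then pvLoopA rest (force, token, tunnel, some p)
    else if p = "http" ∨ p = "tcp" ∨ p = "tls" ∨ p = "tlstcp" then
      pvLoopA rest (force, token, some p, udp)
    else if p ≠ "qr" ∧ p ≠ "aqr" ∧ p ≠ "auth" then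
      pvLoopA rest (force, if token = none then some orig else token, tunnel, udp)
    else pvLoopA rest (force, token, tunnel, udp)

def parse_server_address_and_type (server_address : String) :
    Option String × Option String × Option String × Option String × Bool :=
  let parts := (PySem.Str.split? server_address "@").getD []
  match parts with
  | [type_and_token, address] =>
    let (force, token, tunnel, udp) :=
      pvLoopA ((PySem.Str.split? type_and_token "+").getD []) (false, none, none, none)
    (some address, tunnel, udp, token, force)
  | _ => (parts.head?, none, none, none, false)   -- parts[0]; split never yields [], so head? is always some

-- ===== PORT B =====
def pvSpecial : List String := ["force", "udp", "http", "tcp", "tls", "tlstcp", "qr", "aqr", "auth"]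
def pvTunnel : List String := ["http", "tcp", "tls", "tlstcp"]

def parse_server_address_and_type_alt (server_address : String) :
    Option String × Option String × Option String × Option String × Bool :=
  let parts := (PySem.Str.split? server_address "@").getD []
  if parts.length ≠ 2 then (parts.head?, none, none, none, false)
  else
    let type_and_token := parts.headD ""
    let address := parts.getD 1 ""
    let ps := (PySem.Str.split? type_and_token "+").getD []
    let lows := ps.map PySem.Str.lower
    let force := lows.any (· == "force")
    let udp_type := if lows.contains "udp" then some "udp" else none
    let tunnel_type := lows.reverse.find? (fun l => pvTunnel.contains l)
    let token := ((ps.zip lows).find? (fun pl => !pvSpecial.contains pl.2)).map Prod.fst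
    (some address, tunnel_type, udp_type, token, force)

-- ===== PRECONDITION & SPEC =====
def Spec_parse_server_address_and_type (server_address : String) (out : Option String × Option String × Option String × Option String × Bool) : Prop := out = parse_server_address_and_type_alt server_address
instance (server_address : String) (out : Option String × Option String × Option String × Option String × Bool) : Decidable (Spec_parse_server_address_and_type server_address out) := by unfold Spec_parse_server_address_and_type; infer_instance

-- ===== CLAIM (what is proved, stated in full; the proofs are below) =====
def Claim_equal_parse_server_address_and_type : Prop := ∀ (server_address : String), Dom_parse_server_address_and_type server_address → Spec_parse_server_address_and_type server_address (parse_server_address_and_type server_address)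

-- ===== LEMMAS AND PROOFS =====

-- Characterisation of A's loop in terms of B's four independent passes.
lemma pvLoopA_eq (l : List String) (force : Bool) (token tunnel udp : Option String) :
    pvLoopA l (force, token, tunnel, udp) =
      (force || (l.map PySem.Str.lower).any (· == "force"),
       token.or (((l.zip (l.map PySem.Str.lower)).find? (fun pl => !pvSpecial.contains pl.2)).map Prod.fst),
       ((l.map PySem.Str.lower).reverse.find? (fun s => pvTunnel.contains s)).or tunnel,
       if (l.map PySem.Str.lower).contains "udp" then some "udp" else udp) := by
  induction l generalizing force token tunnel udp with
  | nil => simp [pvLoopA]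
  | cons x xs ih =>
    simp only [pvLoopA]
    by_cases h1 : PySem.Str.lower x = "force"
    · rw [if_pos h1, ih]
      simp [h1, pvSpecial, pvTunnel, List.find?_append]
    rw [if_neg h1]
    by_cases h2 : PySem.Str.lower x = "udp"
    · rw [if_pos h2, ih]
      simp [h2, pvSpecial, pvTunnel, List.find?_append]
    rw [if_neg h2]
    by_cases h3 : PySem.Str.lower x = "http" ∨ PySem.Str.lower x = "tcp" ∨ PySem.Str.lower x = "tls" ∨ PySem.Str.lower x = "tlstcp"
    · rw [if_pos h3, ih]
      rcases h3 with h | h | h | h <;>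
        simp [h, pvSpecial, pvTunnel, List.find?_append]
    rw [if_neg h3]
    push_neg at h3
    obtain ⟨ha, hb, hc, hd⟩ := h3
    by_cases h4 : PySem.Str.lower x ≠ "qr" ∧ PySem.Str.lower x ≠ "aqr" ∧ PySem.Str.lower x ≠ "auth"
    · rw [if_pos h4]
      obtain ⟨h5, h6, h7⟩ := h4
      have hxm : PySem.Str.lower x ∉ pvSpecial := by
        simp [pvSpecial, h1, h2, ha, hb, hc, hd, h5, h6, h7]
      have hym : PySem.Str.lower x ∉ pvTunnel := by
        simp [pvTunnel, ha, hb, hc, hd]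
      have hf : (PySem.Str.lower x == "force") = false := by simp [h1]
      have hu : "udp" ≠ PySem.Str.lower x := fun h => h2 h.symm
      cases token with
      | none => rw [ih]; simp [hxm, hym, hf, hu, List.find?_append]
      | some t => rw [ih]; simp [hxm, hym, hf, hu, List.find?_append]
    · rw [if_neg h4]
      push_neg at h4
      have h5 : PySem.Str.lower x = "qr" ∨ PySem.Str.lower x = "aqr" ∨ PySem.Str.lower x = "auth" := by
        by_contra hcn; push_neg at hcn
        exact hcn.2.2 (h4 hcn.1 hcn.2.1)
      rw [ih]
      rcases h5 with h | h | h <;>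
        simp [h, pvSpecial, pvTunnel, List.find?_append]

-- ===== VERDICT (by name: the statement is the Claim_ definition above) =====
theorem parse_server_address_and_type_spec : Claim_equal_parse_server_address_and_type := by
  intro s _
  show parse_server_address_and_type s = parse_server_address_and_type_alt s
  simp only [parse_server_address_and_type, parse_server_address_and_type_alt]
  generalize (PySem.Str.split? s "@").getD [] = parts
  match parts with
  | [] => rfl
  | [a] => rfl
  | a :: b :: c :: r => rfl
  | [tt, addr] =>
    simp only [pvLoopA_eq]
    simp
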